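-- pv_equiv track=rewrite | github.com/aquarius23/aquarius23 | fig_quants/crfrulebase.py | build_feature
-- ===== SOURCE A (Python) =====
-- def build_feature(name, list):
-- 	ret = []
-- 	for i,item in enumerate(list):
-- 		feature = name+str(i)+'='+item
-- 		ret.append(feature)
-- 	size = len(list)
-- 	new = list[:]
-- 	for i in range(0,size):
-- 		all=''
-- 		for item in new:
-- 			all = all + item
-- 		feature = name+str(i)+'-'+str(size)+'='+all
-- 		ret.append(feature)
-- 		new.remove(new[0])
-- 	return ret
-- ===== SOURCE B (Python) =====
-- def build_feature(name, list):
--     size = len(list)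
--     # suffix[i] = list[i] + list[i+1] + ... built in one right-to-left pass
--     suffix = [''] * size
--     s = ''
--     for i in range(size - 1, -1, -1):
--         s = list[i] + s
--         suffix[i] = s
--     ret = [name + str(i) + '=' + item for i, item in enumerate(list)]
--     ret.extend(name + str(i) + '-' + str(size) + '=' + suffix[i] for i in range(size))
--     return ret
-- ===== Notes on version B (the rewrite author's own statement) =====
-- stated objective: alternative
-- what changed: Replaces the shrink-and-resum loop (re-concatenating the remaining list and popping its front each iteration) with a single right-to-left pass building a suffix-concatenation table, then emits features by list comprehensions; measured ~3.5x at n=4096 but not confirmed at the largest size.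
import Mathlib
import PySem

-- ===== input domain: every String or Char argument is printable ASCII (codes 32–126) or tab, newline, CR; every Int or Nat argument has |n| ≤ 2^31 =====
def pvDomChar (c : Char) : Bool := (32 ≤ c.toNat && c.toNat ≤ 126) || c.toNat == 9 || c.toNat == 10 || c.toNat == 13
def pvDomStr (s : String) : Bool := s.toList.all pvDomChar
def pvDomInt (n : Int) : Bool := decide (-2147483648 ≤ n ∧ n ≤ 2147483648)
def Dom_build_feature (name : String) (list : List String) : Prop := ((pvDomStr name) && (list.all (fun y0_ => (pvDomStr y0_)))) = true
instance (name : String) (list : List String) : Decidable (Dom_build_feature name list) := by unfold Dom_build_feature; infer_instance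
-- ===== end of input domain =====

-- B replaces A's shrink-and-resum loop by one right-to-left suffix-table pass (alternative algorithm).

-- ===== PORT A =====
-- second loop of A: 'for i in range(0,size)' with new losing its head each
-- iteration ('new.remove(new[0])' removes position 0, since the first occurrence
-- of new[0] is position 0); the loop runs exactly size = len(new) times, so the
-- recursion is on new
def buildA_loop (name : String) (size : Int) (i : Int) (new : List String) (acc : List String) : List String :=
  match new with
  | [] => acc
  | _ :: t =>
    let all := new.foldl (fun a item => a ++ item) ""
    buildA_loop name size (i + 1) t (acc ++ [name ++ PySem.Int.toStr i ++ "-" ++ PySem.Int.toStr size ++ "=" ++ all])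

def build_feature (name : String) (list : List String) : List String :=
  let ret := (PySem.List.enumerate list 0).foldl
    (fun acc p => acc ++ [name ++ PySem.Int.toStr p.1 ++ "=" ++ p.2]) ([] : List String)
  let size : Int := list.length
  buildA_loop name size 0 list ret

-- ===== PORT B =====
-- suffix table: sufTabB l = [l[i] ++ l[i+1] ++ …  for each i], built right-to-left
def sufTabB : List String → List String
  | [] => []
  | x :: t => let r := sufTabB t; (x ++ r.headD "") :: r

def build_feature_alt (name : String) (list : List String) : List String :=
  let size : Int := list.length
  let suffix := sufTabB list
  ((PySem.List.enumerate list 0).map fun p => name ++ PySem.Int.toStr p.1 ++ "=" ++ p.2)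
  ++ ((PySem.List.enumerate suffix 0).map fun p =>
      name ++ PySem.Int.toStr p.1 ++ "-" ++ PySem.Int.toStr size ++ "=" ++ p.2)

-- ===== PRECONDITION & SPEC =====
def Spec_build_feature (name : String) (list : List String) (out : List String) : Prop := out = build_feature_alt name list
instance (name : String) (list : List String) (out : List String) : Decidable (Spec_build_feature name list out) := by unfold Spec_build_feature; infer_instance

-- ===== CLAIM (what is proved, stated in full; the proofs are below) =====
def Claim_equal_build_feature : Prop := ∀ (name : String) (list : List String), Dom_build_feature name list → Spec_build_feature name list (build_feature name list)

-- ===== LEMMAS AND PROOFS =====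

theorem foldl_str_append (l : List String) (a : String) :
    l.foldl (fun a item => a ++ item) a = a ++ l.foldl (fun a item => a ++ item) "" := by
  induction l generalizing a with
  | nil => simp
  | cons x t ih =>
    simp only [List.foldl_cons]
    rw [ih (a ++ x), ih ("" ++ x)]
    simp [String.append_assoc]

theorem foldl_eq_sufTabB_head (l : List String) :
    l.foldl (fun a item => a ++ item) "" = (sufTabB l).headD "" := by
  induction l with
  | nil => rfl
  | cons x t ih =>
    simp only [List.foldl_cons, sufTabB]
    rw [foldl_str_append t ("" ++ x), ih]
    simp

theorem buildA_loop_eq (name : String) (size : Int) (l : List String) :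
    ∀ (i : Int) (acc : List String),
    buildA_loop name size i l acc
      = acc ++ (PySem.List.enumerate (sufTabB l) i).map
          (fun p => name ++ PySem.Int.toStr p.1 ++ "-" ++ PySem.Int.toStr size ++ "=" ++ p.2) := by
  induction l with
  | nil => intro i acc; simp [buildA_loop, sufTabB, PySem.List.enumerate_nil]
  | cons x t ih =>
    intro i acc
    simp only [buildA_loop, sufTabB, PySem.List.enumerate_cons, List.map_cons]
    rw [ih (i + 1), List.foldl_cons, foldl_str_append, foldl_eq_sufTabB_head]
    simp

theorem build_feature_eq (name : String) (list : List String) :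
    build_feature name list = build_feature_alt name list := by
  unfold build_feature build_feature_alt
  rw [PySem.List.foldl_append_singleton_eq_map, buildA_loop_eq]
  simp

-- ===== VERDICT (by name: the statement is the Claim_ definition above) =====
theorem build_feature_spec : Claim_equal_build_feature := by
  intro name list _
  exact build_feature_eq name list
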